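-- pv_equiv track=rewrite | github.com/XXG314/fac | p8 3.py | fac1
-- ===== SOURCE A (Python) =====
-- def fac1(m, n):
--     k = (m + 1) * (m + 2)
--     j = 4 * m + 10
--     n = n - m
--     if n & 1:
--         m += n
--         n -= 1
--     else:
--         if n == 0:
--             return 1
--         m = 1
--     i = (n << 2) + j
--     while j != i:
--         m *= k
--         k += j
--         j += 8
--     return m
-- ===== SOURCE B (Python) =====
-- def fac1(m, n):
--     # product of the integers m+1..n by a divide-and-conquer product tree
--     def prod(a, b):
--         if a > b:
--             return 1
--         if a == b:
--             return a
--         mid = (a + b) // 2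
--         return prod(a, mid) * prod(mid + 1, b)
--     return prod(m + 1, n)
-- ===== Notes on version B (the rewrite author's own statement) =====
-- stated objective: alternative
-- what changed: Replaces A's sequential pairwise-product loop over the range m+1..n with a balanced divide-and-conquer product tree.
-- outside the precondition, e.g. on fac1(3, 1): A does not finish within the time limit, B returns 1
import Mathlib
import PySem

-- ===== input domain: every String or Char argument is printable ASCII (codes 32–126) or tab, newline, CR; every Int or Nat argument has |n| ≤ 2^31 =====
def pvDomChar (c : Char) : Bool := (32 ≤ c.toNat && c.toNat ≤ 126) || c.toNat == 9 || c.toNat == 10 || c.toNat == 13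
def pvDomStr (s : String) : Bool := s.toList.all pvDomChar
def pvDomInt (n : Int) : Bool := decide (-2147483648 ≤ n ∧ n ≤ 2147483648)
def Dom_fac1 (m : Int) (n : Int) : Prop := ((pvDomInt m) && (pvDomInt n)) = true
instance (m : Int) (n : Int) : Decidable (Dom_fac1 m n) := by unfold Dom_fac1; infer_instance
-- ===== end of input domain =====

-- B replaces A's sequential pairwise-product loop over m+1..n with a balanced
-- divide-and-conquer product tree; A diverges
-- when n < m, so Pre_ requires m ≤ n.


-- ===== PORT A =====
-- the `while j != i` loop; fuel = (i - j).toNat, enough for every input in Pre_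
def fac1Loop : Nat → Int → Int → Int → Int → Int
  | 0, m, _, _, _ => m
  | fuel + 1, m, k, j, i =>
    if j ≠ i then fac1Loop fuel (m * k) (k + j) (j + 8) i else m

-- the code after the if/else: `i = (n << 2) + j; while j != i: ...; return m`
def fac1Tail (m n k j : Int) : Int :=
  fac1Loop (n * 4 + j - j).toNat m k j (n * 4 + j)  -- i = (n << 2) + j

def fac1 (m : Int) (n : Int) : Int :=
  let k := (m + 1) * (m + 2)
  let j := 4 * m + 10
  let n := n - m
  if PySem.Int.mod n 2 = 1 then fac1Tail (m + n) (n - 1) k j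
  else if n = 0 then 1
  else fac1Tail 1 n k j

-- ===== PORT B =====
def prodRange (a b : Int) : Int :=
  if a > b then 1
  else if a = b then a
  else
    let mid := PySem.Int.floordiv (a + b) 2
    prodRange a mid * prodRange (mid + 1) b
termination_by (b - a).toNat
decreasing_by
  · have h := PySem.Int.floordiv_eq_ediv_of_pos (a := a + b) (b := 2) (by omega)
    omega
  · have h := PySem.Int.floordiv_eq_ediv_of_pos (a := a + b) (b := 2) (by omega)
    omega

def fac1_alt (m : Int) (n : Int) : Int := prodRange (m + 1) n

-- ===== PRECONDITION & SPEC =====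
-- Pre_ excludes n < m, where A's while loop never terminates (B returns 1 there).
def Pre_fac1 (m : Int) (n : Int) : Prop := m ≤ n
instance (m : Int) (n : Int) : Decidable (Pre_fac1 m n) := by unfold Pre_fac1; infer_instance
def pvWitness_fac1 : Int × Int := (2, 7)

def Spec_fac1 (m : Int) (n : Int) (out : Int) : Prop := out = fac1_alt m n
instance (m : Int) (n : Int) (out : Int) : Decidable (Spec_fac1 m n out) := by unfold Spec_fac1; infer_instance

-- ===== CLAIM (what is proved, stated in full; the proofs are below) =====
def Claim_equal_fac1 : Prop := ∀ (m : Int) (n : Int), Dom_fac1 m n → Pre_fac1 m n → Spec_fac1 m n (fac1 m n)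

-- ===== LEMMAS AND PROOFS =====

-- reference function: the product of the integers a..b
def g (a b : Int) : Int := if b < a then 1 else g a (b - 1) * b
termination_by (b - a + 1).toNat
decreasing_by omega

theorem g_of_lt {a b : Int} (h : b < a) : g a b = 1 := by
  rw [g]; simp [h]

theorem g_of_le {a b : Int} (h : a ≤ b) : g a b = g a (b - 1) * b := by
  rw [g]; simp [Int.not_lt.mpr h]

-- splitting lemma for g
theorem g_merge (a : Int) : ∀ (d : Nat) (mid b : Int), b - mid = d →
    a - 1 ≤ mid → mid ≤ b → g a mid * g (mid + 1) b = g a b := by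
  intro d
  induction d with
  | zero =>
    intro mid b hd _ _
    have hb : mid = b := by omega
    subst hb
    rw [show g (mid + 1) mid = 1 from g_of_lt (by omega)]; ring
  | succ d ih =>
    intro mid b hd h1 h2
    rw [g_of_le (show (mid + 1 : Int) ≤ b by omega), g_of_le (show a ≤ b by omega)]
    rw [← ih mid (b - 1) (by omega) h1 (by omega)]
    ring

theorem prodRange_eq_g : ∀ (d : Nat) (a b : Int), (b - a).toNat = d →
    prodRange a b = g a b := by
  intro d
  induction d using Nat.strong_induction_on with
  | _ d ih =>
    intro a b hd
    rw [prodRange]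
    by_cases h1 : a > b
    · simp [h1, g_of_lt h1]
    · simp only [if_neg h1]
      by_cases h2 : a = b
      · subst h2
        simp [g_of_le le_rfl, g_of_lt (show a - 1 < a by omega)]
      · simp only [if_neg h2]
        have hab : a < b := by omega
        have hmid := PySem.Int.floordiv_eq_ediv_of_pos (a := a + b) (b := 2) (by omega)
        set mid := PySem.Int.floordiv (a + b) 2 with hm
        have hlo : a ≤ mid := by omega
        have hhi : mid < b := by omega
        have hL := ih (mid - a).toNat (by omega) a mid rfl
        have hR := ih (b - (mid + 1)).toNat (by omega) (mid + 1) b rfl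
        rw [hL, hR]
        exact g_merge a (b - mid).toNat mid b (by omega) (by omega) (by omega)

-- loop invariant: starting from k = (c+1)(c+2), j = 4c+10, with i = j + 8T,
-- the loop multiplies acc by the product of c+1 .. c+2T
theorem fac1Loop_eq (T : Nat) : ∀ (fuel : Nat), T ≤ fuel → ∀ (acc c : Int),
    fac1Loop fuel acc ((c + 1) * (c + 2)) (4 * c + 10) (4 * c + 10 + 8 * T)
      = acc * g (c + 1) (c + 2 * T) := by
  induction T with
  | zero =>
    intro fuel _ acc c
    have hg : g (c + 1) c = 1 := g_of_lt (by omega)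
    cases fuel with
    | zero => simp [fac1Loop, hg]
    | succ f => simp [fac1Loop, hg]
  | succ T ih =>
    intro fuel hf acc c
    obtain ⟨f, rfl⟩ : ∃ f, fuel = f + 1 := ⟨fuel - 1, by omega⟩
    have hne : (4 * c + 10 : Int) ≠ 4 * c + 10 + 8 * (T + 1 : Nat) := by
      push_cast; omega
    rw [fac1Loop, if_pos hne]
    have hk : (c + 1) * (c + 2) + (4 * c + 10) = ((c + 2) + 1) * ((c + 2) + 2) := by ring
    have hj : (4 * c + 10 + 8 : Int) = 4 * (c + 2) + 10 := by ring
    have hi : (4 * c + 10 + 8 * (T + 1 : Nat) : Int) = 4 * (c + 2) + 10 + 8 * T := by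
      push_cast; ring
    rw [hk, hj, hi, ih f (by omega) (acc * ((c + 1) * (c + 2))) (c + 2)]
    have hsplit := g_merge (c + 1) (2 * T) (c + 2) (c + 2 + 2 * T)
      (by push_cast; ring) (by omega) (by omega)
    have hg2 : g (c + 1) (c + 2) = (c + 1) * (c + 2) := by
      rw [g_of_le (by omega)]
      rw [show (c + 2 - 1 : Int) = c + 1 from by ring, g_of_le le_rfl,
        g_of_lt (show c + 1 - 1 < c + 1 by omega)]
      ring
    have hcast : (c + 2 * ((T : Int) + 1)) = c + 2 + 2 * T := by ring
    push_cast
    rw [hcast, ← hsplit, hg2]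
    ring

theorem fac1Tail_eq (m0 c : Int) (T : Nat) :
    fac1Tail m0 (2 * T) ((c + 1) * (c + 2)) (4 * c + 10) = m0 * g (c + 1) (c + 2 * T) := by
  unfold fac1Tail
  rw [show (2 * (T : Int)) * 4 + (4 * c + 10) = 4 * c + 10 + 8 * T from by ring,
    show ((4 * c + 10 + 8 * (T : Int)) - (4 * c + 10)).toNat = 8 * T from by omega]
  exact fac1Loop_eq T (8 * T) (by omega) m0 c

theorem fac1_eq_g (m n : Int) (h : m ≤ n) : fac1 m n = g (m + 1) n := by
  unfold fac1
  have hmod : PySem.Int.mod (n - m) 2 = (n - m) % 2 :=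
    PySem.Int.mod_eq_emod_of_pos (by omega)
  by_cases hodd : PySem.Int.mod (n - m) 2 = 1
  · have h1 : (n - m) % 2 = 1 := by omega
    rw [if_pos hodd]
    obtain ⟨T, hT⟩ : ∃ T : Nat, (n - m - 1 : Int) = 2 * T :=
      ⟨(n - m - 1).toNat / 2, by omega⟩
    rw [hT, fac1Tail_eq (m + (n - m)) m T]
    have h2 : (m + 2 * (T : Int)) = n - 1 := by omega
    rw [h2, g_of_le (show m + 1 ≤ n by omega)]
    ring_nf
  · have h1 : (n - m) % 2 = 0 := by omega
    rw [if_neg hodd]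
    by_cases h0 : n - m = 0
    · rw [if_pos h0, g_of_lt (by omega)]
    · rw [if_neg h0]
      obtain ⟨T, hT⟩ : ∃ T : Nat, (n - m : Int) = 2 * T :=
        ⟨(n - m).toNat / 2, by omega⟩
      rw [hT, fac1Tail_eq 1 m T]
      rw [show (m + 2 * (T : Int)) = n by omega, one_mul]

-- ===== VERDICT (by name: the statement is the Claim_ definition above) =====
theorem fac1_spec : Claim_equal_fac1 := by
  intro m n _ hpre
  unfold Spec_fac1 fac1_alt
  rw [fac1_eq_g m n hpre, prodRange_eq_g (n - (m + 1)).toNat (m + 1) n rfl]
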